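-- pv_equiv track=rewrite | github.com/lsst/pipe_tasks | python/lsst/pipe/tasks/associationUtils.py | packed_obj_id_to_ss_object_id
-- ===== SOURCE A (Python) =====
-- def packed_obj_id_to_ss_object_id(objID):
--     """Convert from Minor Planet Center packed provisional object ID to
--     Rubin ssObjectID.
--
--     Parameters
--     ----------
--     objID : `str`
--         Minor Planet Center packed provisional designation for a small solar
--         system object. Must be fewer than eight characters.
--
--     Returns
--     -------
--     ssObjectID : `int`
--         Rubin ssObjectID
--
--     Raises
--     ------
--     ValueError
--         Raised if either objID is shorter than 7 or longer than 8 characters or contains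
--         illegal objID characters
--     """
--     if len(objID) > 8:
--         raise ValueError(f'objID longer than 8 characters: "{objID}"')
--     if len(objID) < 7:
--         raise ValueError(f'objID shorter than 7 characters: "{objID}"')
--     if any([ord(c) > 255 for c in objID]):
--         raise ValueError(f'{[c for c in objID if ord(c) > 255]} not legal objID characters (ascii [1, 255])')
--
--     ssObjectID = ord(objID[0])
--     for character in objID[1:]:
--         ssObjectID <<= 8
--         ssObjectID += ord(character)
--     return ssObjectID
-- ===== SOURCE B (Python) =====
-- def packed_obj_id_to_ss_object_id(objID):
--     if len(objID) > 8:
--         raise ValueError(f'objID longer than 8 characters: "{objID}"')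
--     if len(objID) < 7:
--         raise ValueError(f'objID shorter than 7 characters: "{objID}"')
--     if any([ord(c) > 255 for c in objID]):
--         raise ValueError(f'{[c for c in objID if ord(c) > 255]} not legal objID characters (ascii [1, 255])')
--     return int.from_bytes(objID.encode('latin-1'), 'big')
-- ===== Notes on version B (the rewrite author's own statement) =====
-- stated objective: idiomatic
-- what changed: The seed-then-shift-add loop over the characters is replaced by a single closed-form int.from_bytes on the latin-1 byte encoding of the validated string; the three validation guards are unchanged.
import Mathlib
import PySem

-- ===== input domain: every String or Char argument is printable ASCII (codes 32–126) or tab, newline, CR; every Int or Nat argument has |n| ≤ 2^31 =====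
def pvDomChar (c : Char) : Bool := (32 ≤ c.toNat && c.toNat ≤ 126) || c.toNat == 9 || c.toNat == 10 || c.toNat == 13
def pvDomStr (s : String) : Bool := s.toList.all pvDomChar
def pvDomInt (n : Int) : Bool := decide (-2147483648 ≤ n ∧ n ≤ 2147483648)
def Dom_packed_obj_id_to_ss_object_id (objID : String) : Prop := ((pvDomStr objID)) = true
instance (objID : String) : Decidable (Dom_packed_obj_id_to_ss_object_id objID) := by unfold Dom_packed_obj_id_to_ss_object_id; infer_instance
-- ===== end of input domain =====

-- B keeps A's validation guards but replaces the seed-then-shift-add loop by a closed-form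
-- int.from_bytes(objID.encode('latin-1'), 'big') (idiomatic; same O(n) cost).
-- ===== PORT A =====
-- On inputs failing the guards the Python raises ValueError; Pre_ excludes exactly those,
-- so the port computes the seed/loop only (0 outside Pre_ is never claimed).
def packed_obj_id_to_ss_object_id (objID : String) : Int :=
  match objID.toList with
  | [] => 0
  | c :: rest =>
    -- ssObjectID = ord(objID[0]); for character in objID[1:]: ssObjectID <<= 8; += ord(character)
    rest.foldl (fun acc ch => acc * 256 + (ch.toNat : Int)) ((c.toNat : Int))

-- ===== PORT B =====
-- port of int.from_bytes(bytes, 'big'): big-endian positional sum, built back-to-front with weights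
def pvFromBytesBE (bs : List Int) : Int :=
  (bs.foldr (fun b p => (p.1 + b * p.2, p.2 * 256)) ((0 : Int), (1 : Int))).1

def packed_obj_id_to_ss_object_id_alt (objID : String) : Int :=
  -- objID.encode('latin-1') : one byte per character (code point), then int.from_bytes big-endian
  pvFromBytesBE (objID.toList.map (fun ch => (ch.toNat : Int)))

-- ===== PRECONDITION & SPEC =====
-- Pre_ excludes exactly the inputs where A raises ValueError: length outside {7,8}
-- (the ord(c)>255 guard never fires on Dom's ASCII strings).
def Pre_packed_obj_id_to_ss_object_id (objID : String) : Prop :=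
  objID.toList.length = 7 ∨ objID.toList.length = 8
instance (objID : String) : Decidable (Pre_packed_obj_id_to_ss_object_id objID) := by
  unfold Pre_packed_obj_id_to_ss_object_id; infer_instance

def pvWitness_packed_obj_id_to_ss_object_id : String := "2010AB7"

def Spec_packed_obj_id_to_ss_object_id (objID : String) (out : Int) : Prop := out = packed_obj_id_to_ss_object_id_alt objID
instance (objID : String) (out : Int) : Decidable (Spec_packed_obj_id_to_ss_object_id objID out) := by unfold Spec_packed_obj_id_to_ss_object_id; infer_instance

-- ===== CLAIM (what is proved, stated in full; the proofs are below) =====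
def Claim_equal_packed_obj_id_to_ss_object_id : Prop := ∀ (objID : String), Dom_packed_obj_id_to_ss_object_id objID → Pre_packed_obj_id_to_ss_object_id objID → Spec_packed_obj_id_to_ss_object_id objID (packed_obj_id_to_ss_object_id objID)

-- ===== LEMMAS AND PROOFS =====
theorem pvFromBytes_snd (bs : List Int) :
    (bs.foldr (fun b p => (p.1 + b * p.2, p.2 * 256)) ((0 : Int), (1 : Int))).2 = 256 ^ bs.length := by
  induction bs with
  | nil => simp
  | cons b bs ih => simp [List.foldr_cons, ih, pow_succ]

theorem pvFromBytes_cons (b : Int) (bs : List Int) :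
    pvFromBytesBE (b :: bs) = b * 256 ^ bs.length + pvFromBytesBE bs := by
  simp [pvFromBytesBE, List.foldr_cons, pvFromBytes_snd]; ring

theorem pvFoldl_eq (bs : List Int) (a : Int) :
    bs.foldl (fun acc c => acc * 256 + c) a = a * 256 ^ bs.length + pvFromBytesBE bs := by
  induction bs generalizing a with
  | nil => simp [pvFromBytesBE]
  | cons b bs ih =>
    rw [List.foldl_cons, ih, pvFromBytes_cons]
    rw [List.length_cons, pow_succ]
    ring

-- ===== VERDICT (by name: the statement is the Claim_ definition above) =====
theorem packed_obj_id_to_ss_object_id_spec : Claim_equal_packed_obj_id_to_ss_object_id := by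
  intro objID _ hpre
  unfold Spec_packed_obj_id_to_ss_object_id
  unfold packed_obj_id_to_ss_object_id packed_obj_id_to_ss_object_id_alt
  rcases h : objID.toList with _ | ⟨c, rest⟩
  · exact absurd hpre (by simp [Pre_packed_obj_id_to_ss_object_id, h])
  · show List.foldl (fun acc ch => acc * 256 + (ch.toNat : Int)) ((c.toNat : Int)) rest
        = pvFromBytesBE ((c :: rest).map (fun ch => (ch.toNat : Int)))
    have : rest.foldl (fun acc ch => acc * 256 + (ch.toNat : Int)) ((c.toNat : Int))
        = (rest.map (fun ch => (ch.toNat : Int))).foldl (fun acc v => acc * 256 + v) ((c.toNat : Int)) := by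
      simp [List.foldl_map]
    rw [this, pvFoldl_eq, List.map_cons, pvFromBytes_cons]
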